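-- pv_equiv track=rewrite | github.com/jmoon34/leetcode | BinarySearch.py | binary_search_upper_end
-- ===== SOURCE A (Python) =====
-- def binary_search_upper_end(arr, k):
--     left = 0
--     right = len(arr) - 1
--     while left <= right:
--         mid = (left + right) // 2
--         if arr[mid] <= k:
--             left = mid + 1
--         else:
--             right = mid - 1
--     return right
-- ===== SOURCE B (Python) =====
-- def binary_search_upper_end(arr, k):
--     # Recursive search over (lo, n): the window of n remaining candidates starting
--     # at lo; answer is lo - 1 when the window is empty.
--     def go(lo, n):
--         if n == 0:
--             return lo - 1
--         h = (n - 1) // 2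
--         if arr[lo + h] <= k:
--             return go(lo + h + 1, n - h - 1)
--         return go(lo, h)
--     return go(0, len(arr))
-- ===== Notes on version B (the rewrite author's own statement) =====
-- stated objective: alternative
-- what changed: Replaces the iterative two-pointer while loop over (left, right) by a recursive search over (lo, n) — window start and remaining window size — whose base case returns lo - 1; the midpoint becomes lo + (n-1)//2 and the recursion shrinks n, probing the same sequence of elements.
import Mathlib
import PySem

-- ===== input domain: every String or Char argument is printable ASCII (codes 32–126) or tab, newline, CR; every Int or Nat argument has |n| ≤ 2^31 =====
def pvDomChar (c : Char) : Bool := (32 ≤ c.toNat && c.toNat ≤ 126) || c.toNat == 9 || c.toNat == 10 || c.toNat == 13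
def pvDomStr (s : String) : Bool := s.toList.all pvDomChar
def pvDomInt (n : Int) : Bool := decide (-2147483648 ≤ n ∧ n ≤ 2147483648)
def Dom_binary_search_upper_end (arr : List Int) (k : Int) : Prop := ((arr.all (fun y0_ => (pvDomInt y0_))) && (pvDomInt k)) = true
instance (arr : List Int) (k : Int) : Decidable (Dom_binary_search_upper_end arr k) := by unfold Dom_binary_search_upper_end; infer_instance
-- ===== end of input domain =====

-- B rewrites A's iterative (left, right) while loop as a recursion over (lo, n) = window start
-- and window size with base case lo - 1; same probes, same result (objective: alternative).

-- ===== PORT A =====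
-- A's while loop. The fuel argument only makes the recursion structural; arr.length iterations
-- always suffice (the window shrinks each step), and the loop exits with right = left - 1, so the
-- fuel-0 fallback 'right' is never the computed value on the calls the main function makes.
-- arr[mid] is in range on every reachable state (0 ≤ left ≤ mid ≤ right < len), so pyGetD
-- with default 0 is exact there.
def pvALoop (arr : List Int) (k : Int) (left right : Int) : Nat → Int
  | 0 => right
  | fuel + 1 =>
    if left ≤ right then
      let mid := PySem.Int.floordiv (left + right) 2
      if PySem.List.pyGetD arr mid 0 ≤ k then pvALoop arr k (mid + 1) right fuel
      else pvALoop arr k left (mid - 1) fuel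
    else right

def binary_search_upper_end (arr : List Int) (k : Int) : Int :=
  pvALoop arr k 0 ((arr.length : Int) - 1) arr.length

-- ===== PORT B =====
-- Source B's go(lo, n), recursion on the window size n (the fuel IS n: both recursive calls shrink it).
def pvBGo (arr : List Int) (k : Int) : Int → Nat → Int
  | lo, 0 => lo - 1
  | lo, n + 1 =>
    let h := n / 2
    if PySem.List.pyGetD arr (lo + (h : Int)) 0 ≤ k then pvBGo arr k (lo + (h : Int) + 1) (n - h)
    else pvBGo arr k lo h

def binary_search_upper_end_alt (arr : List Int) (k : Int) : Int :=
  pvBGo arr k 0 arr.length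

-- ===== PRECONDITION & SPEC =====
def Spec_binary_search_upper_end (arr : List Int) (k : Int) (out : Int) : Prop := out = binary_search_upper_end_alt arr k
instance (arr : List Int) (k : Int) (out : Int) : Decidable (Spec_binary_search_upper_end arr k out) := by unfold Spec_binary_search_upper_end; infer_instance

-- ===== CLAIM (what is proved, stated in full; the proofs are below) =====
def Claim_equal_binary_search_upper_end : Prop := ∀ (arr : List Int) (k : Int), Dom_binary_search_upper_end arr k → Spec_binary_search_upper_end arr k (binary_search_upper_end arr k)

-- ===== LEMMAS AND PROOFS =====

-- The loop on (left, right) = (lo, lo + n - 1) with fuel ≥ n computes B's recursion on (lo, n).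
theorem pvALoop_eq_pvBGo (arr : List Int) (k : Int) :
    ∀ (n : Nat) (lo : Int) (f : Nat), n ≤ f →
      pvALoop arr k lo (lo + (n : Int) - 1) f = pvBGo arr k lo n := by
  intro n
  induction n using Nat.strong_induction_on with
  | _ n ih =>
    intro lo f hf
    match n, f with
    | 0, 0 => simp [pvALoop, pvBGo]
    | 0, f + 1 =>
      rw [pvALoop, pvBGo, if_neg (by omega : ¬ lo ≤ lo + ((0 : Nat) : Int) - 1)]
      omega
    | m + 1, f + 1 =>
      rw [pvALoop, pvBGo, if_pos (by omega : lo ≤ lo + ((m + 1 : Nat) : Int) - 1)]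
      have hmid : PySem.Int.floordiv (lo + (lo + ((m + 1 : Nat) : Int) - 1)) 2
          = lo + ((m / 2 : Nat) : Int) := by
        rw [PySem.Int.floordiv_eq_ediv_of_pos (by omega)]
        omega
      simp only [hmid]
      by_cases hc : PySem.List.pyGetD arr (lo + ((m / 2 : Nat) : Int)) 0 ≤ k
      · rw [if_pos hc, if_pos hc]
        have h2 : lo + ((m + 1 : Nat) : Int) - 1
            = (lo + ((m / 2 : Nat) : Int) + 1) + ((m - m / 2 : Nat) : Int) - 1 := by omega
        rw [h2]
        exact ih (m - m / 2) (by omega) _ f (by omega)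
      · rw [if_neg hc, if_neg hc]
        exact ih (m / 2) (by omega) lo f (by omega)

-- ===== VERDICT (by name: the statement is the Claim_ definition above) =====
theorem binary_search_upper_end_spec : Claim_equal_binary_search_upper_end := by
  intro arr k _
  unfold Spec_binary_search_upper_end binary_search_upper_end binary_search_upper_end_alt
  have h := pvALoop_eq_pvBGo arr k arr.length 0 arr.length (le_refl _)
  rw [← h]
  congr 1
  omega
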